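-- pv_equiv track=rewrite | github.com/Jeg0g/CS331Assignments | JakeWeinsteinAssignment1.py | art
-- ===== SOURCE A (Python) =====
-- def art(s: str) -> str:
--     outstr=""
--     for i in range(1,len(s)):
--         tempstr=s[::-1][:i][::-1]
--         temp3=""
--         for j in range(len(tempstr)-1):
--             temp3+=tempstr[j]+"."
--         temp3+=tempstr[len(tempstr)-1]
--         temp3+=".."*(len(s)-i)
--         temp2=temp3[1:][::-1]+temp3
--         outstr+=temp2+"\n"
--     revoutstr=outstr[::-1]
--     tempstr=s
--     temp3=""
--     for j in range(len(tempstr)-1):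
--         temp3+=tempstr[j]+"."
--     temp3+=tempstr[len(tempstr)-1]
--     temp2=temp3[1:][::-1]+temp3
--     outstr+=temp2
--     outstr+=revoutstr
--     return outstr
-- ===== SOURCE B (Python) =====
-- def art(s: str) -> str:
--     n = len(s)
--     lines = []
--     for r in range(2 * n - 1):
--         d = n - 1 - abs(r - (n - 1))
--         row = ['.'] * (4 * n - 3)
--         for k in range(d + 1):
--             ch = s[n - 1 - d + k]
--             row[2 * (n - 1 - k)] = ch
--             row[2 * (n - 1 + k)] = ch
--         lines.append(''.join(row))
--     return '\n'.join(lines)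
-- ===== Notes on version B (the rewrite author's own statement) =====
-- stated objective: alternative
-- what changed: B treats the output as a (2n-1) x (4n-3) grid: for each row it computes the depth d = n-1-|r-(n-1)| from the row coordinate, starts from a row of dots and writes character s[n-1-d+k] directly at its two mirrored column coordinates 2(n-1-k) and 2(n-1+k), instead of A's per-row suffix slicing, dot-interleaving loop, half-row reversal and whole-output reversal.
-- outside the precondition, e.g. on art(''): A raises IndexError, B returns ''
import Mathlib
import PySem

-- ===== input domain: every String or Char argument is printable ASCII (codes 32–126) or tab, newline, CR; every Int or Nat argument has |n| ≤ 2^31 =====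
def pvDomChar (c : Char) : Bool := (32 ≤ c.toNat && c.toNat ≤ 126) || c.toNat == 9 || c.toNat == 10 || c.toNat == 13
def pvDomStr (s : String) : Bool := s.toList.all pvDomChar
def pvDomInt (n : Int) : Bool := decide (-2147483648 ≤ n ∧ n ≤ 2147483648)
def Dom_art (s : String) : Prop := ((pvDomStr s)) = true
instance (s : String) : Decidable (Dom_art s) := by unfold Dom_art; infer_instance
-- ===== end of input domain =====

-- B builds each output row as a grid of dots and places every letter directly at its two
-- mirrored coordinates computed by a closed-form distance formula, instead of A's
-- suffix-slicing, dot-interleaving and string-reversal construction (objective: alternative).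

-- ===== PORT A =====
-- literal transliteration of A; the `.getD` defaults on pyGet? are reachable only for s = "" (excluded by Pre_art, where Python raises IndexError)
def art (s : String) : String :=
  let cs := s.toList
  let outstr : List Char :=
    (PySem.List.pyRange 1 (cs.length : Int)).foldl (fun outstr i =>
      let tempstr := (PySem.List.slice? (PySem.List.slice ((PySem.List.slice? cs none none (-1)).getD []) none (some i)) none none (-1)).getD []
      let temp3 := (PySem.List.pyRange 0 ((tempstr.length : Int) - 1)).foldl
        (fun acc j => acc ++ [(PySem.List.pyGet? tempstr j).getD ' ', '.']) []
      let temp3 := temp3 ++ [(PySem.List.pyGet? tempstr ((tempstr.length : Int) - 1)).getD ' ']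
      let temp3 := temp3 ++ (List.replicate ((cs.length : Int) - i).toNat ['.', '.']).flatten
      let temp2 := ((PySem.List.slice? (PySem.List.slice temp3 (some 1) none) none none (-1)).getD []) ++ temp3
      outstr ++ (temp2 ++ ['\n'])) []
  let revoutstr := (PySem.List.slice? outstr none none (-1)).getD []
  let tempstr := cs
  let temp3 := (PySem.List.pyRange 0 ((tempstr.length : Int) - 1)).foldl
      (fun acc j => acc ++ [(PySem.List.pyGet? tempstr j).getD ' ', '.']) []
  let temp3 := temp3 ++ [(PySem.List.pyGet? tempstr ((tempstr.length : Int) - 1)).getD ' ']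
  let temp2 := ((PySem.List.slice? (PySem.List.slice temp3 (some 1) none) none none (-1)).getD []) ++ temp3
  String.ofList (outstr ++ temp2 ++ revoutstr)

-- ===== PORT B =====
-- Source B's inner loop body: place the two mirrored copies of character k into the row
-- (the `.getD ' '` default on pyGet? is unreachable: the index is in range whenever k ≤ d)
def art_alt (s : String) : String :=
  let cs := s.toList
  let n : Int := cs.length
  let lines := (PySem.List.pyRange 0 (2 * n - 1)).foldl (fun lines r =>
    let d := n - 1 - |r - (n - 1)|
    let row := List.replicate (4 * n - 3).toNat ('.' : Char)
    let row := (PySem.List.pyRange 0 (d + 1)).foldl (fun row k =>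
      let ch := (PySem.List.pyGet? cs (n - 1 - d + k)).getD ' '
      let row := PySem.List.pySetD row (2 * (n - 1 - k)) ch
      PySem.List.pySetD row (2 * (n - 1 + k)) ch) row
    lines ++ [row]) []
  String.ofList (PySem.Chars.join ['\n'] lines)

-- ===== PRECONDITION & SPEC =====
-- Pre_ excludes only the empty string, on which A raises IndexError (s[len(s)-1] on "").
def Pre_art (s : String) : Prop := s ≠ ""
instance (s : String) : Decidable (Pre_art s) := by unfold Pre_art; infer_instance
def pvWitness_art : String := "ab"

def Spec_art (s : String) (out : String) : Prop := out = art_alt s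
instance (s : String) (out : String) : Decidable (Spec_art s out) := by unfold Spec_art; infer_instance

-- ===== CLAIM (what is proved, stated in full; the proofs are below) =====
def Claim_equal_art : Prop := ∀ (s : String), Dom_art s → Pre_art s → Spec_art s (art s)

-- ===== LEMMAS AND PROOFS =====

-- canonical row: dot-join of t, padded with p pairs of dots, mirrored about its first character
def rowOf (t : List Char) (p : Nat) : List Char :=
  (PySem.Chars.join ['.'] (t.map (fun c => [c])) ++ (List.replicate p ['.', '.']).flatten).tail.reverse
    ++ (PySem.Chars.join ['.'] (t.map (fun c => [c])) ++ (List.replicate p ['.', '.']).flatten)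

-- row at depth d (0 = outermost): last d+1 characters of cs, padded
def rowD (cs : List Char) (d : Nat) : List Char :=
  rowOf (cs.drop (cs.length - 1 - d)) (cs.length - 1 - d)

-- A's per-iteration line (the loop body of A's first loop, without the trailing newline)
def bodyA (cs : List Char) (i : Int) : List Char :=
  let tempstr := (PySem.List.slice? (PySem.List.slice ((PySem.List.slice? cs none none (-1)).getD []) none (some i)) none none (-1)).getD []
  let temp3 := (PySem.List.pyRange 0 ((tempstr.length : Int) - 1)).foldl
    (fun acc j => acc ++ [(PySem.List.pyGet? tempstr j).getD ' ', '.']) []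
  let temp3 := temp3 ++ [(PySem.List.pyGet? tempstr ((tempstr.length : Int) - 1)).getD ' ']
  let temp3 := temp3 ++ (List.replicate ((cs.length : Int) - i).toNat ['.', '.']).flatten
  ((PySem.List.slice? (PySem.List.slice temp3 (some 1) none) none none (-1)).getD []) ++ temp3

-- A's middle line
def middleA (cs : List Char) : List Char :=
  let temp3 := (PySem.List.pyRange 0 ((cs.length : Int) - 1)).foldl
      (fun acc j => acc ++ [(PySem.List.pyGet? cs j).getD ' ', '.']) []
  let temp3 := temp3 ++ [(PySem.List.pyGet? cs ((cs.length : Int) - 1)).getD ' ']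
  ((PySem.List.slice? (PySem.List.slice temp3 (some 1) none) none none (-1)).getD []) ++ temp3

-- join with a one-char separator, over a nonempty tail / before an appended last piece
theorem join_cons_ne (c : Char) (a : List Char) (l : List (List Char)) (h : l ≠ []) :
    PySem.Chars.join [c] (a :: l) = a ++ c :: PySem.Chars.join [c] l := by
  cases l with
  | nil => exact absurd rfl h
  | cons b l' => simp [PySem.Chars.join_cons_cons]

theorem join_snoc (c : Char) (l : List (List Char)) (a : List Char) (h : l ≠ []) :
    PySem.Chars.join [c] (l ++ [a]) = PySem.Chars.join [c] l ++ c :: a := by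
  induction l with
  | nil => exact absurd rfl h
  | cons x l' ih =>
    cases l' with
    | nil => simp [PySem.Chars.join_cons_cons, PySem.Chars.join_singleton]
    | cons y l'' =>
      have hih := ih (by simp)
      simp only [List.cons_append] at hih ⊢
      rw [PySem.Chars.join_cons_cons, hih, PySem.Chars.join_cons_cons]
      simp

-- every canonical row is a horizontal palindrome
theorem rowOf_palindrome (t : List Char) (p : Nat) :
    (rowOf t p).reverse = rowOf t p := by
  unfold rowOf
  cases h : (PySem.Chars.join ['.'] (t.map (fun c => [c])) ++ (List.replicate p ['.', '.']).flatten) with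
  | nil => simp
  | cons a as => simp

-- the sandwich: palindromic rows glued by c on both sides of the middle equal the join form
theorem sandwich (c : Char) (ts : List (List Char)) (M : List Char)
    (hpal : ∀ t ∈ ts, t.reverse = t) :
    (ts.flatMap (· ++ [c])) ++ M ++ (ts.flatMap (· ++ [c])).reverse
      = PySem.Chars.join [c] (ts ++ M :: ts.reverse) := by
  induction ts with
  | nil => simp [PySem.Chars.join_singleton]
  | cons t ts ih =>
    have ht : t.reverse = t := hpal t (by simp)
    have ih' := ih (fun u hu => hpal u (by simp [hu]))
    have h1 : (ts ++ M :: ts.reverse) ≠ [] := by simp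
    calc ((t :: ts).flatMap (· ++ [c])) ++ M ++ ((t :: ts).flatMap (· ++ [c])).reverse
        = t ++ c :: ((ts.flatMap (· ++ [c])) ++ M ++ (ts.flatMap (· ++ [c])).reverse) ++ c :: t := by
          simp [List.flatMap_cons, ht]
      _ = t ++ c :: (PySem.Chars.join [c] (ts ++ M :: ts.reverse)) ++ c :: t := by rw [ih']
      _ = PySem.Chars.join [c] ((t :: ts) ++ M :: (t :: ts).reverse) := by
          rw [List.reverse_cons]
          have h2 : (t :: ts) ++ M :: (ts.reverse ++ [t]) = t :: ((ts ++ M :: ts.reverse) ++ [t]) := by simp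
          rw [h2, join_cons_ne c t _ (by simp), join_snoc c _ t h1]
          simp

-- the index-flatMap form of A's dot loop equals join over singleton pieces
theorem coreFlat (a : Char) (as : List Char) :
    (List.range as.length).flatMap (fun j => [(a :: as)[j]?.getD ' ', '.'])
      ++ [(a :: as)[as.length]?.getD ' ']
    = PySem.Chars.join ['.'] ((a :: as).map (fun c => [c])) := by
  induction as generalizing a with
  | nil => simp [PySem.Chars.join_singleton]
  | cons b as' ih =>
    simp only [List.length_cons, List.range_succ_eq_map, List.flatMap_cons, List.flatMap_map,
      List.getElem?_cons_succ, List.getElem?_cons_zero, Option.getD_some, List.map_cons]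
    rw [PySem.Chars.join_cons_cons]
    have := ih b
    simp only [List.map_cons] at this
    simp only [List.cons_append, List.nil_append] at this ⊢
    rw [this]

-- A's hand-rolled dot loop equals str.join over the singleton pieces (nonempty t)
theorem coreA_eq (t : List Char) (ht : t ≠ []) :
    ((PySem.List.pyRange 0 ((t.length : Int) - 1)).foldl
        (fun acc j => acc ++ [(PySem.List.pyGet? t j).getD ' ', '.']) [])
      ++ [(PySem.List.pyGet? t ((t.length : Int) - 1)).getD ' ']
    = PySem.Chars.join ['.'] (t.map (fun c => [c])) := by
  obtain ⟨a, as, rfl⟩ := List.exists_cons_of_ne_nil ht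
  rw [PySem.List.foldl_append_eq_flatMap]
  have hlen : ((a :: as).length : Int) - 1 = ((as.length : Nat) : Int) := by
    simp only [List.length_cons]; push_cast; ring
  rw [hlen, PySem.List.pyRange_zero_natCast, List.flatMap_map]
  simp only [PySem.List.pyGet?_natCast, List.nil_append]
  exact coreFlat a as

-- s[::-1][:i][::-1] is the last i.toNat characters
theorem tempstr_eq (cs : List Char) (i : Int) (hi : 0 ≤ i) :
    (PySem.List.slice? (PySem.List.slice ((PySem.List.slice? cs none none (-1)).getD []) none (some i)) none none (-1)).getD []
      = cs.drop (cs.length - i.toNat) := by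
  rw [PySem.List.slice?_none_none_neg_one, Option.getD_some, PySem.List.slice_to,
      PySem.List.slice?_none_none_neg_one, Option.getD_some,
      List.take_reverse, List.reverse_reverse]
  exact hi

theorem bodyA_eq (cs : List Char) (i : Int) (h1 : 1 ≤ i) (h2 : i < (cs.length : Int)) :
    bodyA cs i = rowOf (cs.drop (((cs.length : Int) - i).toNat)) (((cs.length : Int) - i).toNat) := by
  have hdrop : cs.length - i.toNat = ((cs.length : Int) - i).toNat := by omega
  have hne : cs.drop (((cs.length : Int)) - i).toNat ≠ [] := by
    intro h
    have := List.drop_eq_nil_iff.mp h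
    omega
  unfold bodyA rowOf
  simp only [tempstr_eq cs i (by omega : (0:Int) ≤ i), hdrop]
  rw [← List.append_assoc, coreA_eq _ hne]
  rw [PySem.List.slice_from_one, PySem.List.slice?_none_none_neg_one, Option.getD_some]
  simp [List.append_assoc]

theorem middleA_eq (cs : List Char) (h : cs ≠ []) : middleA cs = rowOf cs 0 := by
  simp only [middleA, rowOf]
  rw [coreA_eq cs h]
  rw [PySem.List.slice_from_one, PySem.List.slice?_none_none_neg_one, Option.getD_some]
  simp

-- flatMap of singletons is map
theorem flatMap_sing {α β : Type} (l : List α) (g : α → β) :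
    List.flatMap (fun x => [g x]) l = l.map g := by
  induction l with
  | nil => rfl
  | cons a l ih => simp [List.flatMap_cons, ih]

-- ((range m).map f).reverse is the map of the reflected index
theorem revMap {α : Type} (m : Nat) (f : Nat → α) :
    ((List.range m).map f).reverse = (List.range m).map (fun j => f (m - 1 - j)) := by
  apply List.ext_getElem
  · simp
  · intro i h1 h2
    simp only [List.length_reverse, List.length_map, List.length_range] at h1
    rw [List.getElem_reverse]
    simp only [List.getElem_map, List.getElem_range, List.length_map, List.length_range]

-- dot padding: p copies of ".." flatten to 2*p dots
theorem padEq (p : Nat) : (List.replicate p ['.', '.']).flatten = List.replicate (2 * p) ('.' : Char) := by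
  induction p with
  | zero => rfl
  | succ q ih =>
    rw [List.replicate_succ, List.flatten_cons, ih]
    have h : 2 * (q + 1) = (2 * q) + 1 + 1 := by omega
    rw [h, List.replicate_succ, List.replicate_succ]
    rfl

-- dot-join of singletons as a map over indices
theorem joinSing (t : List Char) (ht : t ≠ []) :
    PySem.Chars.join ['.'] (t.map (fun c => [c]))
      = (List.range (2 * t.length - 1)).map
          (fun j => if j % 2 = 0 then t.getD (j / 2) ' ' else '.') := by
  induction t with
  | nil => exact absurd rfl ht
  | cons a as ih =>
    cases as with
    | nil => simp [PySem.Chars.join_singleton, List.range_succ]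
    | cons b as' =>
      rw [List.map_cons, List.map_cons, PySem.Chars.join_cons_cons]
      have ih' := ih (by simp)
      rw [List.map_cons] at ih'
      rw [ih']
      have hlen : 2 * (a :: b :: as').length - 1 = 2 + (2 * (b :: as').length - 1) := by
        simp only [List.length_cons]; omega
      rw [hlen, List.range_add, List.map_append, List.map_map]
      have hr2 : List.range 2 = [0, 1] := by decide
      rw [hr2]
      simp only [List.map_cons, List.map_nil]
      norm_num

-- reflected column index: distance of c from the centre column 2*len-2
def gIdx (len c : Nat) : Nat := if c ≤ 2 * len - 2 then 2 * len - 2 - c else c - (2 * len - 2)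

-- the closed-form cell (Nat world)
def gCell (cs : List Char) (d c : Nat) : Char :=
  if c % 2 = 0 ∧ gIdx cs.length c / 2 ≤ d
  then cs.getD (cs.length - 1 - d + gIdx cs.length c / 2) ' ' else '.'

-- core cell: the unmirrored dotted row as a function of the column index
def g2 (cs : List Char) (d j : Nat) : Char :=
  if j % 2 = 0 ∧ j / 2 ≤ d then cs.getD (cs.length - 1 - d + j / 2) ' ' else '.'

-- the core of the canonical row as a map over indices
theorem core_map (cs : List Char) (d : Nat) (hd : d < cs.length) :
    PySem.Chars.join ['.'] ((cs.drop (cs.length - 1 - d)).map (fun c => [c]))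
        ++ (List.replicate (cs.length - 1 - d) ['.', '.']).flatten
      = (List.range (2 * cs.length - 1)).map (g2 cs d) := by
  have tlen : (cs.drop (cs.length - 1 - d)).length = d + 1 := by
    rw [List.length_drop]; omega
  have ht : cs.drop (cs.length - 1 - d) ≠ [] := by
    intro h; rw [h] at tlen; simp at tlen
  rw [joinSing _ ht, tlen, padEq]
  have hrep : List.replicate (2 * (cs.length - 1 - d)) ('.' : Char)
      = (List.range (2 * (cs.length - 1 - d))).map (fun _ => '.') := by
    rw [List.map_const', List.length_range]
  rw [hrep]
  have hsplit : 2 * cs.length - 1 = (2 * (d + 1) - 1) + 2 * (cs.length - 1 - d) := by omega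
  rw [hsplit, List.range_add, List.map_append, List.map_map]
  congr 1
  · apply List.map_congr_left
    intro j hj
    rw [List.mem_range] at hj
    unfold g2
    by_cases hp : j % 2 = 0
    · have hle : j / 2 ≤ d := by omega
      rw [if_pos hp, if_pos ⟨hp, hle⟩]
      rw [List.getD_eq_getElem?_getD, List.getD_eq_getElem?_getD, List.getElem?_drop]
    · rw [if_neg hp, if_neg (by tauto)]
  · apply List.map_congr_left
    intro j hj
    have hno : ¬((2 * (d + 1) - 1 + j) % 2 = 0 ∧ (2 * (d + 1) - 1 + j) / 2 ≤ d) := by omega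
    simp only [Function.comp_apply, g2, if_neg hno]

-- the canonical row at depth d < len, as a map of the closed-form cell over all columns
theorem rowD_map (cs : List Char) (d : Nat) (hd : d < cs.length) :
    rowD cs d = (List.range (4 * cs.length - 3)).map (gCell cs d) := by
  unfold rowD rowOf
  rw [core_map cs d hd]
  have htail : ((List.range (2 * cs.length - 1)).map (g2 cs d)).tail
      = (List.range (2 * cs.length - 2)).map (fun j => g2 cs d (1 + j)) := by
    have h1 : 2 * cs.length - 1 = 1 + (2 * cs.length - 2) := by omega
    rw [h1, List.range_add]
    rw [show List.range 1 = [0] from rfl]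
    rw [List.map_append, List.map_map]
    rfl
  rw [htail, revMap]
  have h4 : 4 * cs.length - 3 = (2 * cs.length - 2) + (2 * cs.length - 1) := by omega
  rw [h4, List.range_add, List.map_append, List.map_map]
  congr 1
  · apply List.map_congr_left
    intro j hj
    rw [List.mem_range] at hj
    have harg : 1 + (2 * cs.length - 2 - 1 - j) = 2 * cs.length - 2 - j := by omega
    rw [harg]
    unfold g2 gCell gIdx
    rw [if_pos (by omega : j ≤ 2 * cs.length - 2)]
    have hm : (2 * cs.length - 2 - j) % 2 = j % 2 := by omega
    rw [hm]
  · apply List.map_congr_left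
    intro j hj
    rw [List.mem_range] at hj
    simp only [Function.comp_apply]
    unfold g2 gCell gIdx
    have hgi : (if 2 * cs.length - 2 + j ≤ 2 * cs.length - 2 then 2 * cs.length - 2 - (2 * cs.length - 2 + j) else 2 * cs.length - 2 + j - (2 * cs.length - 2)) = j := by
      split_ifs <;> omega
    rw [hgi]
    have hm : (2 * cs.length - 2 + j) % 2 = j % 2 := by omega
    rw [hm]

-- set into a map over range, as a map
theorem set_map_range {α : Type} (L p : Nat) (f : Nat → α) (v : α) :
    ((List.range L).map f).set p v = (List.range L).map (fun j => if j = p then v else f j) := by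
  apply List.ext_getElem
  · simp
  · intro i h1 h2
    rw [List.getElem_set]
    simp only [List.getElem_map, List.getElem_range]
    by_cases h : i = p
    · rw [if_pos (by omega), if_pos h]
    · rw [if_neg (by omega), if_neg h]

-- the partially built row after m placement steps
def gCellM (cs : List Char) (d m j : Nat) : Char :=
  if j % 2 = 0 ∧ gIdx cs.length j / 2 < m
  then cs.getD (cs.length - 1 - d + gIdx cs.length j / 2) ' ' else '.'

-- B's inner placement loop, run for the first m of its d+1 steps, as a map over columns
theorem foldSet (cs : List Char) (d : Nat) (hd : d < cs.length) (m : Nat) (hm : m ≤ d + 1) :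
    (PySem.List.pyRange 0 (m : Int)).foldl (fun row k =>
        PySem.List.pySetD
          (PySem.List.pySetD row (2 * ((cs.length : Int) - 1 - k))
            ((PySem.List.pyGet? cs ((cs.length : Int) - 1 - (d : Int) + k)).getD ' '))
          (2 * ((cs.length : Int) - 1 + k))
          ((PySem.List.pyGet? cs ((cs.length : Int) - 1 - (d : Int) + k)).getD ' '))
      (List.replicate (4 * (cs.length : Int) - 3).toNat ('.' : Char))
    = (List.range (4 * cs.length - 3)).map (gCellM cs d m) := by
  induction m with
  | zero =>
    rw [show ((0 : Nat) : Int) = 0 from rfl, PySem.List.pyRange_one_eq_nil (by omega), List.foldl_nil]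
    rw [show (4 * (cs.length : Int) - 3).toNat = 4 * cs.length - 3 from by omega]
    rw [show List.replicate (4 * cs.length - 3) ('.' : Char)
          = (List.range (4 * cs.length - 3)).map (fun _ => '.') from by
        rw [List.map_const', List.length_range]]
    apply List.map_congr_left
    intro j _
    simp [gCellM]
  | succ m ih =>
    have hm' : m ≤ d + 1 := by omega
    rw [show ((m + 1 : Nat) : Int) = (m : Int) + 1 from by push_cast; ring]
    rw [PySem.List.pyRange_one_succ_right (by omega), List.foldl_append, ih hm',
      List.foldl_cons, List.foldl_nil]
    have hch : (cs.length : Int) - 1 - (d : Int) + (m : Int)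
        = ((cs.length - 1 - d + m : Nat) : Int) := by omega
    have hp1 : 2 * ((cs.length : Int) - 1 - (m : Int)) = ((2 * (cs.length - 1 - m) : Nat) : Int) := by omega
    have hp2 : 2 * ((cs.length : Int) - 1 + (m : Int)) = ((2 * (cs.length - 1 + m) : Nat) : Int) := by omega
    rw [hch, hp1, hp2, PySem.List.pyGet?_natCast, PySem.List.pySetD_natCast, PySem.List.pySetD_natCast]
    rw [← List.getD_eq_getElem?_getD]
    rw [set_map_range, set_map_range]
    apply List.map_congr_left
    intro j hj
    rw [List.mem_range] at hj
    have hgidx : gIdx cs.length j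
        = (if j ≤ 2 * cs.length - 2 then 2 * cs.length - 2 - j else j - (2 * cs.length - 2)) := rfl
    by_cases hj2 : j = 2 * (cs.length - 1 + m)
    · have hg : gIdx cs.length j = 2 * m := by rw [hgidx]; split_ifs <;> omega
      rw [if_pos hj2]
      unfold gCellM
      rw [hg, if_pos ⟨by omega, by omega⟩]
      congr 1
      omega
    · rw [if_neg hj2]
      by_cases hj1 : j = 2 * (cs.length - 1 - m)
      · have hg : gIdx cs.length j = 2 * m := by rw [hgidx]; split_ifs <;> omega
        rw [if_pos hj1]
        unfold gCellM
        rw [hg, if_pos ⟨by omega, by omega⟩]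
        congr 1
        omega
      · rw [if_neg hj1]
        unfold gCellM
        by_cases hc : j % 2 = 0 ∧ gIdx cs.length j / 2 < m
        · rw [if_pos hc, if_pos ⟨hc.1, by omega⟩]
        · have hc2 : ¬(j % 2 = 0 ∧ gIdx cs.length j / 2 < m + 1) := by
            rintro ⟨he, hlt⟩
            have : gIdx cs.length j / 2 = m := by
              rcases Nat.lt_or_ge (gIdx cs.length j / 2) m with h | h
              · exact absurd ⟨he, h⟩ hc
              · omega
            rw [hgidx] at this
            by_cases hle : j ≤ 2 * cs.length - 2
            · rw [if_pos hle] at this; omega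
            · rw [if_neg hle] at this; omega
          rw [if_neg hc, if_neg hc2]

-- after all d+1 steps the partial row is the closed-form row
theorem gCellM_top (cs : List Char) (d j : Nat) : gCellM cs d (d + 1) j = gCell cs d j := by
  unfold gCellM gCell
  by_cases he : j % 2 = 0 ∧ gIdx cs.length j / 2 ≤ d
  · rw [if_pos ⟨he.1, by omega⟩, if_pos he]
  · rw [if_neg (by rintro ⟨h1, h2⟩; exact he ⟨h1, by omega⟩), if_neg he]

-- B's loop body for one row (the zeta-reduced inner loop of art_alt)
def bodyB (cs : List Char) (r : Int) : List Char :=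
  (PySem.List.pyRange 0 (((cs.length : Int) - 1 - |r - ((cs.length : Int) - 1)|) + 1)).foldl
    (fun row k =>
      PySem.List.pySetD
        (PySem.List.pySetD row (2 * ((cs.length : Int) - 1 - k))
          ((PySem.List.pyGet? cs ((cs.length : Int) - 1
              - ((cs.length : Int) - 1 - |r - ((cs.length : Int) - 1)|) + k)).getD ' '))
        (2 * ((cs.length : Int) - 1 + k))
        ((PySem.List.pyGet? cs ((cs.length : Int) - 1
            - ((cs.length : Int) - 1 - |r - ((cs.length : Int) - 1)|) + k)).getD ' '))
    (List.replicate (4 * (cs.length : Int) - 3).toNat ('.' : Char))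

-- B's row at Nat row-index r, at depth d, equals the canonical row
theorem bodyB_eq (cs : List Char) (r d : Nat) (hd : d < cs.length)
    (habs : |(r : Int) - ((cs.length : Int) - 1)| = (cs.length : Int) - 1 - (d : Int)) :
    bodyB cs (r : Int) = rowD cs d := by
  unfold bodyB
  rw [habs]
  rw [show (cs.length : Int) - 1 - ((cs.length : Int) - 1 - (d : Int)) = (d : Int) from by omega]
  rw [show (d : Int) + 1 = ((d + 1 : Nat) : Int) from by push_cast; ring]
  rw [foldSet cs d hd (d + 1) (by omega), rowD_map cs d hd]
  exact List.map_congr_left (fun j _ => gCellM_top cs d j)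

-- A in join-of-rows normal form
theorem artA_join (s : String) :
    art s = String.ofList (PySem.Chars.join ['\n']
      (((PySem.List.pyRange 1 (s.toList.length : Int)).map
          (fun i => rowOf (s.toList.drop (((s.toList.length : Int) - i).toNat)) (((s.toList.length : Int) - i).toNat)))
        ++ middleA s.toList
          :: ((PySem.List.pyRange 1 (s.toList.length : Int)).map
          (fun i => rowOf (s.toList.drop (((s.toList.length : Int) - i).toNat)) (((s.toList.length : Int) - i).toNat))).reverse)) := by
  have main :
      (List.foldl (fun (o : List Char) (i : Int) => o ++ (bodyA s.toList i ++ ['\n'])) []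
          (PySem.List.pyRange 1 (s.toList.length : Int)))
        ++ middleA s.toList
        ++ (PySem.List.slice? (List.foldl (fun (o : List Char) (i : Int) => o ++ (bodyA s.toList i ++ ['\n'])) []
              (PySem.List.pyRange 1 (s.toList.length : Int))) none none (-1)).getD []
      = PySem.Chars.join ['\n']
          (((PySem.List.pyRange 1 (s.toList.length : Int)).map
              (fun i => rowOf (s.toList.drop (((s.toList.length : Int) - i).toNat)) (((s.toList.length : Int) - i).toNat)))
            ++ middleA s.toList
              :: ((PySem.List.pyRange 1 (s.toList.length : Int)).map
              (fun i => rowOf (s.toList.drop (((s.toList.length : Int) - i).toNat)) (((s.toList.length : Int) - i).toNat))).reverse) := by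
    rw [PySem.List.foldl_append_eq_flatMap]
    have hmap : (PySem.List.pyRange 1 (s.toList.length : Int)).map (fun i => bodyA s.toList i ++ ['\n'])
        = (PySem.List.pyRange 1 (s.toList.length : Int)).map
            (fun i => rowOf (s.toList.drop (((s.toList.length : Int) - i).toNat)) (((s.toList.length : Int) - i).toNat) ++ ['\n']) := by
      apply List.map_congr_left
      intro i hi
      have hmem := PySem.List.mem_pyRange_one.mp hi
      rw [bodyA_eq s.toList i hmem.1 hmem.2]
    have hflat : List.flatMap (fun i => bodyA s.toList i ++ ['\n']) (PySem.List.pyRange 1 (s.toList.length : Int))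
        = ((PySem.List.pyRange 1 (s.toList.length : Int)).map
            (fun i => rowOf (s.toList.drop (((s.toList.length : Int) - i).toNat)) (((s.toList.length : Int) - i).toNat))).flatMap (· ++ ['\n']) := by
      rw [List.flatMap_map, List.flatMap_def, hmap, ← List.flatMap_def]
    have hpal : ∀ t ∈ (PySem.List.pyRange 1 (s.toList.length : Int)).map
        (fun i => rowOf (s.toList.drop (((s.toList.length : Int) - i).toNat)) (((s.toList.length : Int) - i).toNat)),
        t.reverse = t := by
      intro t ht
      obtain ⟨i, _, rfl⟩ := List.mem_map.mp ht
      exact rowOf_palindrome _ _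
    simp only [List.nil_append, hflat, PySem.List.slice?_none_none_neg_one, Option.getD_some]
    exact sandwich '\n' _ (middleA s.toList) hpal
  exact congrArg String.ofList main

-- B in the same normal form
set_option maxHeartbeats 1000000 in
theorem artB_join (s : String) (hcs : s.toList ≠ []) :
    art_alt s = String.ofList (PySem.Chars.join ['\n']
      (((PySem.List.pyRange 1 (s.toList.length : Int)).map
          (fun i => rowOf (s.toList.drop (((s.toList.length : Int) - i).toNat)) (((s.toList.length : Int) - i).toNat)))
        ++ middleA s.toList
          :: ((PySem.List.pyRange 1 (s.toList.length : Int)).map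
          (fun i => rowOf (s.toList.drop (((s.toList.length : Int) - i).toNat)) (((s.toList.length : Int) - i).toNat))).reverse)) := by
  have len1 : 1 ≤ s.toList.length := List.length_pos_of_ne_nil hcs
  have main : (PySem.List.pyRange 0 (2 * (s.toList.length : Int) - 1)).foldl
        (fun lines r => lines ++ [bodyB s.toList r]) []
      = ((PySem.List.pyRange 1 (s.toList.length : Int)).map
          (fun i => rowOf (s.toList.drop (((s.toList.length : Int) - i).toNat)) (((s.toList.length : Int) - i).toNat)))
        ++ middleA s.toList
          :: ((PySem.List.pyRange 1 (s.toList.length : Int)).map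
          (fun i => rowOf (s.toList.drop (((s.toList.length : Int) - i).toNat)) (((s.toList.length : Int) - i).toNat))).reverse := by
    have htop : (PySem.List.pyRange 1 (s.toList.length : Int)).map
        (fun i => rowOf (s.toList.drop (((s.toList.length : Int) - i).toNat)) (((s.toList.length : Int) - i).toNat))
        = (List.range (s.toList.length - 1)).map (fun k => rowD s.toList k) := by
      rw [PySem.List.pyRange_one]
      rw [show ((s.toList.length : Int) - 1).toNat = s.toList.length - 1 from by omega]
      rw [List.map_map]
      apply List.map_congr_left
      intro k hk
      rw [List.mem_range] at hk
      simp only [Function.comp_apply]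
      rw [show ((s.toList.length : Int) - (1 + (k : Nat))).toNat = s.toList.length - 1 - k from by omega]
      rfl
    have hmid : middleA s.toList = rowD s.toList (s.toList.length - 1) := by
      rw [middleA_eq _ hcs]
      unfold rowD
      rw [Nat.sub_self, List.drop_zero]
    have h2n : 2 * (s.toList.length : Int) - 1 = ((2 * s.toList.length - 1 : Nat) : Int) := by omega
    rw [PySem.List.foldl_append_eq_flatMap]
    simp only [List.nil_append]
    rw [h2n, PySem.List.pyRange_zero_natCast, List.flatMap_map]
    rw [flatMap_sing, htop, hmid, revMap]
    rw [show 2 * s.toList.length - 1 = (s.toList.length - 1) + (1 + (s.toList.length - 1)) from by omega]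
    rw [List.range_add, List.map_append, List.range_add]
    rw [show List.range 1 = [0] from rfl]
    simp only [List.map_map, List.map_cons,
      List.cons_append, List.nil_append]
    refine congrArg₂ (· ++ ·) ?_ (congrArg₂ (· :: ·) ?_ ?_)
    · apply List.map_congr_left
      intro r hr
      rw [List.mem_range] at hr
      exact bodyB_eq s.toList r r (by omega)
        (by rw [abs_of_nonpos (by omega)]; omega)
    · exact bodyB_eq s.toList (s.toList.length - 1 + 0) (s.toList.length - 1) (by omega)
        (by rw [show ((s.toList.length - 1 + 0 : Nat) : Int) - ((s.toList.length : Int) - 1) = 0 from by omega, abs_zero]; omega)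
    · apply List.map_congr_left
      intro j hj
      rw [List.mem_range] at hj
      exact bodyB_eq s.toList (s.toList.length - 1 + (1 + j)) (s.toList.length - 1 - 1 - j) (by omega)
        (by rw [abs_of_nonneg (by omega)]; omega)
  exact congrArg (fun l => String.ofList (PySem.Chars.join ['\n'] l)) main

-- ===== VERDICT (by name: the statement is the Claim_ definition above) =====
theorem art_spec : Claim_equal_art := by
  intro s _ hpre
  unfold Spec_art
  have hcs : s.toList ≠ [] := by
    intro h
    exact hpre (by
      have := congrArg String.ofList h
      simpa using this)
  rw [artA_join s, artB_join s hcs]
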